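-- pv_equiv track=rewrite | github.com/martinakaduc/parsel | pf_assignment/Ex4.py | getListOfVowelClusters
-- ===== SOURCE A (Python) =====
-- def getListOfVowelClusters(input: str) -> list:
--     vowels = "aeiouAEIOU"
--     vowel_clusters = []
--     current_cluster = ""
--     for letter in input:
--         if letter in vowels:
--             current_cluster += letter
--         else:
--             if current_cluster != "":
--                 vowel_clusters.append(current_cluster)
--                 current_cluster = ""
--     if current_cluster != "":
--         vowel_clusters.append(current_cluster)
--     return vowel_clusters
-- ===== SOURCE B (Python) =====
-- def getListOfVowelClusters(input: str) -> list:
--     vowels = set("aeiouAEIOU")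
--     clusters = []
--     i = 0
--     n = len(input)
--     while i < n:
--         if input[i] in vowels:
--             j = i + 1
--             while j < n and input[j] in vowels:
--                 j += 1
--             clusters.append(input[i:j])
--             i = j
--         else:
--             i += 1
--     return clusters
-- ===== Notes on version B (the rewrite author's own statement) =====
-- stated objective: alternative
-- what changed: Replaces the accumulator-and-flush state machine with a two-pointer span scan: on hitting a vowel it advances a second index to the end of the run and slices that run out directly, so no current-cluster string is ever built or flushed.
import Mathlib
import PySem

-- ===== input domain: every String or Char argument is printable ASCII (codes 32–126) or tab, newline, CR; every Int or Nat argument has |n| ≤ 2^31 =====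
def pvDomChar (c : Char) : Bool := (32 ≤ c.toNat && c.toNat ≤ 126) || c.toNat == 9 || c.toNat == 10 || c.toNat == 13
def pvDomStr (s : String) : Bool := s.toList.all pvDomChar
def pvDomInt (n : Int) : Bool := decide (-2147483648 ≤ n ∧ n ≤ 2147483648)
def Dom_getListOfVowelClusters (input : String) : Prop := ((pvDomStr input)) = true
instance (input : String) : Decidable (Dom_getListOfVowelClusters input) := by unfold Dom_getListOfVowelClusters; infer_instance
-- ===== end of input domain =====

-- B replaces A's accumulator-and-flush state machine by a two-pointer span scan that
-- slices each maximal vowel run out directly (alternative decomposition, same cost).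

-- ===== PORT A =====
-- letter in "aeiouAEIOU"
def pvVowelA (letter : Char) : Bool := "aeiouAEIOU".toList.contains letter

-- the for-loop of A as structural recursion over the same state
-- (vowel_clusters accumulator `acc`, current_cluster `cur`); the trailing
-- `if current_cluster != ""` flush is the base case.
def pvGoA (cs : List Char) (acc : List String) (cur : List Char) : List String :=
  match cs with
  | [] => if cur ≠ [] then acc ++ [String.mk cur] else acc
  | letter :: rest =>
      if pvVowelA letter then pvGoA rest acc (cur ++ [letter])
      else if cur ≠ [] then pvGoA rest (acc ++ [String.mk cur]) []
      else pvGoA rest acc cur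

def getListOfVowelClusters (input : String) : List String :=
  pvGoA input.toList [] []

-- ===== PORT B =====
def pvVowelB (c : Char) : Bool := "aeiouAEIOU".toList.contains c

-- the outer while-loop of Source B: skip a non-vowel, or take the whole vowel span
-- (the inner `while j < n` advance = takeWhile/dropWhile) and continue at j.
def pvGoB (cs : List Char) : List String :=
  match cs with
  | [] => []
  | c :: rest =>
      if pvVowelB c then
        String.mk (c :: List.takeWhile pvVowelB rest) :: pvGoB (List.dropWhile pvVowelB rest)
      else pvGoB rest
termination_by cs.length
decreasing_by
  · simpa using Nat.lt_succ_of_le (List.length_dropWhile_le pvVowelB rest)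
  · simp

def getListOfVowelClusters_alt (input : String) : List String :=
  pvGoB input.toList

-- ===== PRECONDITION & SPEC =====
def Spec_getListOfVowelClusters (input : String) (out : List String) : Prop := out = getListOfVowelClusters_alt input
instance (input : String) (out : List String) : Decidable (Spec_getListOfVowelClusters input out) := by unfold Spec_getListOfVowelClusters; infer_instance

-- ===== CLAIM (what is proved, stated in full; the proofs are below) =====
def Claim_equal_getListOfVowelClusters : Prop := ∀ (input : String), Dom_getListOfVowelClusters input → Spec_getListOfVowelClusters input (getListOfVowelClusters input)

-- ===== LEMMAS AND PROOFS =====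

theorem pvGoA_eq (cs : List Char) : ∀ (cur : List Char) (acc : List String),
    pvGoA cs acc cur =
      acc ++ (if cur = [] then pvGoB cs
              else String.mk (cur ++ List.takeWhile pvVowelB cs) ::
                   pvGoB (List.dropWhile pvVowelB cs)) := by
  induction cs with
  | nil =>
    intro cur acc
    by_cases h : cur = [] <;> simp [pvGoA, pvGoB, h]
  | cons c rest ih =>
    intro cur acc
    by_cases hv : pvVowelA c
    · have hv' : pvVowelB c := hv
      by_cases h : cur = []
      · simp [pvGoA, pvGoB, hv, hv', h, ih]
      · have : cur ++ [c] ≠ [] := by simp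
        simp [pvGoA, pvGoB, hv, hv', h, ih, List.takeWhile, List.dropWhile, this]
    · have hv' : ¬ pvVowelB c := hv
      by_cases h : cur = []
      · simp [pvGoA, pvGoB, hv, hv', h, ih]
      · simp [pvGoA, pvGoB, hv, hv', h, ih, List.takeWhile, List.dropWhile]

-- ===== VERDICT (by name: the statement is the Claim_ definition above) =====
theorem getListOfVowelClusters_spec : Claim_equal_getListOfVowelClusters := by
  intro input _
  show getListOfVowelClusters input = getListOfVowelClusters_alt input
  simp [getListOfVowelClusters, getListOfVowelClusters_alt, pvGoA_eq]
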